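-- pv_equiv track=rewrite | github.com/AmatorX/google_sheets_app | sheets/general_statistics_sheet.py | generate_horizontal_block_for_object
-- ===== SOURCE A (Python) =====
-- def generate_horizontal_block_for_object(months_data: dict[str, list[list]]) -> list[list]:
--     """
--     Формирует горизонтальный блок из 12 мини-таблиц по месяцам.
--     Каждый месяц = 2 колонки + 1 пустая. Если данных нет — вставляются пустые ячейки.
--     """
--     month_names = [
--         'January', 'February', 'March', 'April', 'May', 'June',
--         'July', 'August', 'September', 'October', 'November', 'December'
--     ]
--
--     header_row = []
--     data_rows = [[] for _ in range(5)]
--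
--     for month in month_names:
--         if month in months_data:
--             mini_block = months_data[month]
--             header_row.extend([month, '', ''])
--             for i in range(5):
--                 row = mini_block[i] if i < len(mini_block) else ['', '']
--                 data_rows[i].extend(row + [''])
--         else:
--             header_row.extend(['', '', ''])
--             for i in range(5):
--                 data_rows[i].extend(['', '', ''])
--
--     return [header_row] + data_rows
-- ===== SOURCE B (Python) =====
-- MONTH_NAMES = [
--     'January', 'February', 'March', 'April', 'May', 'June',
--     'July', 'August', 'September', 'October', 'November', 'December'
-- ]
--
--
-- def _header_row(months_data, months):
--     """Header row built by recursion on the month list (front fragment + rest)."""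
--     if not months:
--         return []
--     m = months[0]
--     frag = [m, '', ''] if m in months_data else ['', '', '']
--     return frag + _header_row(months_data, months[1:])
--
--
-- def _data_row(months_data, i, months):
--     """i-th data row built by recursion on the month list."""
--     if not months:
--         return []
--     m = months[0]
--     if m in months_data:
--         mb = months_data[m]
--         frag = (mb[i] if i < len(mb) else ['', '']) + ['']
--     else:
--         frag = ['', '', '']
--     return frag + _data_row(months_data, i, months[1:])
--
--
-- def generate_horizontal_block_for_object(months_data: dict[str, list[list]]) -> list[list]:
--     return [_header_row(months_data, MONTH_NAMES)] + \
--         [_data_row(months_data, i, MONTH_NAMES) for i in range(5)]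
-- ===== Notes on version B (the rewrite author's own statement) =====
-- stated objective: alternative
-- what changed: B makes six independent passes, one per output row, each a recursive function that builds its row by prepending the current month's fragment to the recursively built remainder (no accumulator, no per-month block objects); A makes a single iterative pass over the months maintaining six growing row accumulators in parallel.
import Mathlib
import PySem

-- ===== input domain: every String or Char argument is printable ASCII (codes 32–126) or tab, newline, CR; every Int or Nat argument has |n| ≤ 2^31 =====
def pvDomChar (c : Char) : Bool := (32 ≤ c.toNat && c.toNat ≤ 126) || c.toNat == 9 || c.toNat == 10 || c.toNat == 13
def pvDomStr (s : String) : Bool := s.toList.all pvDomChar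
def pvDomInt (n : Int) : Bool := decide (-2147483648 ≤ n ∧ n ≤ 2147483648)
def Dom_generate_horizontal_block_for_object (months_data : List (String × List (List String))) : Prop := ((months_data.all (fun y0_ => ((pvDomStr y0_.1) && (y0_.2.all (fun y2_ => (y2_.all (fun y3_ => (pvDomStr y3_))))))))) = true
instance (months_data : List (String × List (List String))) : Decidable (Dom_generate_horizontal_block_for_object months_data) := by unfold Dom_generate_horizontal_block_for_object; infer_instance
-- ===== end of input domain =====

-- B builds each of the six output rows by its own recursive pass over the month
-- list (prepending the current month's fragment to the recursively built rest),
-- instead of A's single iterative pass that grows six row accumulators in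
-- parallel. Objective: alternative decomposition (same cost).

-- ===== PORT A =====
-- loop body of A's 'for month in month_names' (extends header_row and each data_rows[i])
def ghbStepA (months_data : List (String × List (List String)))
    (st : List String × List (List String)) (month : String) :
    List String × List (List String) :=
  match months_data.lookup month with
  | some mini_block =>
      (st.1 ++ [month, "", ""],
       (List.range 5).map (fun i =>
         st.2.getD i [] ++
           ((if i < mini_block.length then mini_block.getD i [] else ["", ""]) ++ [""])))
  | none =>
      (st.1 ++ ["", "", ""],
       (List.range 5).map (fun i => st.2.getD i [] ++ ["", "", ""]))

def generate_horizontal_block_for_object (months_data : List (String × List (List String))) : List (List String) :=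
  let month_names : List String :=
    ["January", "February", "March", "April", "May", "June",
     "July", "August", "September", "October", "November", "December"]
  let st := month_names.foldl (ghbStepA months_data) ([], [[], [], [], [], []])
  [st.1] ++ st.2

-- ===== PORT B =====
def ghbMonthNames : List String :=
  ["January", "February", "March", "April", "May", "June",
   "July", "August", "September", "October", "November", "December"]

-- header row: recursion on the month list
def ghbHeaderRow (months_data : List (String × List (List String))) :
    List String → List String
  | [] => []
  | m :: ms =>
      (match months_data.lookup m with
       | some _ => [m, "", ""]
       | none => ["", "", ""]) ++ ghbHeaderRow months_data ms

-- i-th data row: recursion on the month list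
def ghbDataRow (months_data : List (String × List (List String))) (i : Nat) :
    List String → List String
  | [] => []
  | m :: ms =>
      (match months_data.lookup m with
       | some mb => (if i < mb.length then mb.getD i [] else ["", ""]) ++ [""]
       | none => ["", "", ""]) ++ ghbDataRow months_data i ms

def generate_horizontal_block_for_object_alt (months_data : List (String × List (List String))) : List (List String) :=
  [ghbHeaderRow months_data ghbMonthNames] ++
    (List.range 5).map (fun i => ghbDataRow months_data i ghbMonthNames)

-- ===== PRECONDITION & SPEC =====
def Spec_generate_horizontal_block_for_object (months_data : List (String × List (List String))) (out : List (List String)) : Prop := out = generate_horizontal_block_for_object_alt months_data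
instance (months_data : List (String × List (List String))) (out : List (List String)) : Decidable (Spec_generate_horizontal_block_for_object months_data out) := by unfold Spec_generate_horizontal_block_for_object; infer_instance

-- ===== CLAIM (what is proved, stated in full; the proofs are below) =====
def Claim_equal_generate_horizontal_block_for_object : Prop := ∀ (months_data : List (String × List (List String))), Dom_generate_horizontal_block_for_object months_data → Spec_generate_horizontal_block_for_object months_data (generate_horizontal_block_for_object months_data)

-- ===== LEMMAS AND PROOFS =====

theorem ghb_range5 : List.range 5 = [0, 1, 2, 3, 4] := by decide

-- A's fold, started from arbitrary accumulators, appends exactly B's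
-- recursively built rows.
theorem ghb_fold_eq (md : List (String × List (List String))) :
    ∀ (ms : List String) (h d0 d1 d2 d3 d4 : List String),
      ms.foldl (ghbStepA md) (h, [d0, d1, d2, d3, d4]) =
        (h ++ ghbHeaderRow md ms,
         [d0 ++ ghbDataRow md 0 ms,
          d1 ++ ghbDataRow md 1 ms,
          d2 ++ ghbDataRow md 2 ms,
          d3 ++ ghbDataRow md 3 ms,
          d4 ++ ghbDataRow md 4 ms]) := by
  intro ms
  induction ms with
  | nil => intro h d0 d1 d2 d3 d4; simp [ghbHeaderRow, ghbDataRow]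
  | cons m ms ih =>
      intro h d0 d1 d2 d3 d4
      have hstep : ghbStepA md (h, [d0, d1, d2, d3, d4]) m =
          (h ++ ((match md.lookup m with
                  | some _ => [m, "", ""]
                  | none => ["", "", ""]) : List String),
           [d0 ++ (match md.lookup m with
                   | some mb => (if 0 < mb.length then mb.getD 0 [] else ["", ""]) ++ [""]
                   | none => ["", "", ""]),
            d1 ++ (match md.lookup m with
                   | some mb => (if 1 < mb.length then mb.getD 1 [] else ["", ""]) ++ [""]
                   | none => ["", "", ""]),
            d2 ++ (match md.lookup m with
                   | some mb => (if 2 < mb.length then mb.getD 2 [] else ["", ""]) ++ [""]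
                   | none => ["", "", ""]),
            d3 ++ (match md.lookup m with
                   | some mb => (if 3 < mb.length then mb.getD 3 [] else ["", ""]) ++ [""]
                   | none => ["", "", ""]),
            d4 ++ (match md.lookup m with
                   | some mb => (if 4 < mb.length then mb.getD 4 [] else ["", ""]) ++ [""]
                   | none => ["", "", ""])]) := by
        unfold ghbStepA
        cases md.lookup m with
        | none => simp [ghb_range5, List.getD]
        | some mb => simp [ghb_range5, List.getD]
      rw [List.foldl_cons, hstep, ih]
      cases hm : md.lookup m with
      | none => simp [ghbHeaderRow, ghbDataRow, hm, List.append_assoc]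
      | some mb => simp [ghbHeaderRow, ghbDataRow, hm, List.append_assoc]

theorem generate_horizontal_block_for_object_eq_alt
    (md : List (String × List (List String))) :
    generate_horizontal_block_for_object md =
      generate_horizontal_block_for_object_alt md := by
  unfold generate_horizontal_block_for_object generate_horizontal_block_for_object_alt
    ghbMonthNames
  simp only [ghb_fold_eq md, ghb_range5]
  simp

-- ===== VERDICT (by name: the statement is the Claim_ definition above) =====
theorem generate_horizontal_block_for_object_spec : Claim_equal_generate_horizontal_block_for_object := by
  intro md _
  unfold Spec_generate_horizontal_block_for_object
  exact generate_horizontal_block_for_object_eq_alt md
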